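-- pv_equiv track=rewrite | github.com/miliar/Code_Jam_Webscraper | solutions_python/Problem_179/2495.py | get_repr
-- ===== SOURCE A (Python) =====
-- def get_repr(n):
--     result = [n] + [0]*8
--
--     pos = 0
--     while n > 0:
--         if n % 2 == 1:
--             for i in range(3, 11):
--                 result[i-2] += pow(i, pos)
--         n = int(n/2)
--         pos += 1
--     return result
-- ===== SOURCE B (Python) =====
-- def get_repr(n):
--     m = n
--     bits = []
--     while m > 0:
--         bits.append(m % 2)
--         m = int(m / 2)
--     rbits = bits[::-1]
--     out = [n]
--     for b in range(3, 11):
--         val = 0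
--         for bit in rbits:
--             val = val * b + bit
--         out.append(val)
--     return out
-- ===== Notes on version B (the rewrite author's own statement) =====
-- stated objective: alternative
-- what changed: A repeatedly adds pow(i, pos) into a mutable slot for every set bit and every base inside the division loop; B extracts the binary digits once, then evaluates each base 3..10 by Horner's method over the reversed bit list.
import Mathlib
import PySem

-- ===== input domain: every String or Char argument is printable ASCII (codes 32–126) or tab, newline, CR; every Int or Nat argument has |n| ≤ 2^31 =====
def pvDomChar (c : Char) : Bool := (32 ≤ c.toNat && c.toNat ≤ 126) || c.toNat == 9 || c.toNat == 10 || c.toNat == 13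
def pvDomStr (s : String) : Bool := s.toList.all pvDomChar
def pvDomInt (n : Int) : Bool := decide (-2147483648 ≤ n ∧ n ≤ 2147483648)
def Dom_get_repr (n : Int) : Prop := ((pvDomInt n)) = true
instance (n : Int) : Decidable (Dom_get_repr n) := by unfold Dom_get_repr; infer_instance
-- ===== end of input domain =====

-- B re-implements the loop as bit extraction + Horner evaluation per base; return values only, no mutation.
-- Python's int(n/2) is ported as floor division: the loops only divide positive n, where truncation = floor,
-- and on the domain |n| ≤ 2^31 < 2^53 the float division is exact.

-- ===== PORT A =====
-- the inner 'for i in range(3, 11): result[i-2] += pow(i, pos)'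
def getReprInner (pos : Nat) (result : List Int) : List Int :=
  (PySem.List.pyRange 3 11 1).foldl
    (fun r i => r.set (i - 2).toNat ((r.getD (i - 2).toNat 0) + i ^ pos)) result

-- the 'while n > 0' loop
def getReprLoop (n : Int) (pos : Nat) (result : List Int) : List Int :=
  if h : n > 0 then
    let result' := if PySem.Int.mod n 2 = 1 then getReprInner pos result else result
    getReprLoop (PySem.Int.floordiv n 2) (pos + 1) result'
  else result
  termination_by n.toNat
  decreasing_by
    rw [PySem.Int.floordiv_eq_ediv_of_pos (by omega)]
    omega

def get_repr (n : Int) : List Int :=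
  getReprLoop n 0 ([n] ++ [0, 0, 0, 0, 0, 0, 0, 0])

-- ===== PORT B =====
-- 'while m > 0: bits.append(m % 2); m = int(m/2)'  (LSB first)
def bitsOf (m : Int) : List Int :=
  if h : m > 0 then PySem.Int.mod m 2 :: bitsOf (PySem.Int.floordiv m 2) else []
  termination_by m.toNat
  decreasing_by
    rw [PySem.Int.floordiv_eq_ediv_of_pos (by omega)]
    omega

-- 'val = 0; for bit in rbits: val = val * b + bit'
def horner (b : Int) (rbits : List Int) : Int :=
  rbits.foldl (fun val bit => val * b + bit) 0

def get_repr_alt (n : Int) : List Int :=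
  let bits := bitsOf n
  let rbits := bits.reverse
  (PySem.List.pyRange 3 11 1).foldl (fun out b => out ++ [horner b rbits]) [n]

-- ===== PRECONDITION & SPEC =====
def Spec_get_repr (n : Int) (out : List Int) : Prop := out = get_repr_alt n
instance (n : Int) (out : List Int) : Decidable (Spec_get_repr n out) := by unfold Spec_get_repr; infer_instance

-- ===== CLAIM (what is proved, stated in full; the proofs are below) =====
def Claim_equal_get_repr : Prop := ∀ (n : Int), Dom_get_repr n → Spec_get_repr n (get_repr n)

-- ===== LEMMAS AND PROOFS =====

-- value of the bit list (LSB first) in base b, as a fold from the head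
def baseVal (b : Int) (bits : List Int) : Int :=
  bits.foldr (fun bit v => v * b + bit) 0

theorem baseVal_cons (b x : Int) (l : List Int) :
    baseVal b (x :: l) = baseVal b l * b + x := rfl

theorem horner_reverse (b : Int) (bits : List Int) :
    horner b bits.reverse = baseVal b bits := by
  simp [horner, baseVal, List.foldl_reverse]

theorem bitsOf_pos (m : Int) (h : m > 0) :
    bitsOf m = PySem.Int.mod m 2 :: bitsOf (PySem.Int.floordiv m 2) := by
  rw [bitsOf]; simp [h]

theorem bitsOf_nonpos (m : Int) (h : ¬ m > 0) : bitsOf m = [] := by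
  rw [bitsOf]; simp [h]

theorem getReprInner_eq (pos : Nat) (r0 r1 r2 r3 r4 r5 r6 r7 r8 : Int) :
    getReprInner pos [r0, r1, r2, r3, r4, r5, r6, r7, r8] =
      [r0, r1 + 3 ^ pos, r2 + 4 ^ pos, r3 + 5 ^ pos, r4 + 6 ^ pos,
       r5 + 7 ^ pos, r6 + 8 ^ pos, r7 + 9 ^ pos, r8 + 10 ^ pos] := rfl

theorem getReprLoop_eq (n : Int) (pos : Nat)
    (r0 r1 r2 r3 r4 r5 r6 r7 r8 : Int) :
    getReprLoop n pos [r0, r1, r2, r3, r4, r5, r6, r7, r8] =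
      [r0,
       r1 + 3 ^ pos * baseVal 3 (bitsOf n),
       r2 + 4 ^ pos * baseVal 4 (bitsOf n),
       r3 + 5 ^ pos * baseVal 5 (bitsOf n),
       r4 + 6 ^ pos * baseVal 6 (bitsOf n),
       r5 + 7 ^ pos * baseVal 7 (bitsOf n),
       r6 + 8 ^ pos * baseVal 8 (bitsOf n),
       r7 + 9 ^ pos * baseVal 9 (bitsOf n),
       r8 + 10 ^ pos * baseVal 10 (bitsOf n)] := by
  by_cases h : n > 0
  · have hmod : PySem.Int.mod n 2 = n % 2 :=
      PySem.Int.mod_eq_emod_of_pos (by omega)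
    rw [getReprLoop, dif_pos h, bitsOf_pos n h]
    have ih := getReprLoop_eq (PySem.Int.floordiv n 2) (pos + 1)
    by_cases hm : PySem.Int.mod n 2 = 1
    · rw [if_pos hm, getReprInner_eq, ih, hm]
      simp only [baseVal_cons, List.cons.injEq, and_true, true_and]
      refine ⟨?_, ?_, ?_, ?_, ?_, ?_, ?_, ?_⟩ <;> ring
    · rw [if_neg hm, ih]
      have hm0 : PySem.Int.mod n 2 = 0 := by rw [hmod] at hm ⊢; omega
      rw [hm0]
      simp only [baseVal_cons, List.cons.injEq, and_true, true_and]
      refine ⟨?_, ?_, ?_, ?_, ?_, ?_, ?_, ?_⟩ <;> ring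
  · rw [getReprLoop, dif_neg h, bitsOf_nonpos n h]
    simp [baseVal]
  termination_by n.toNat
  decreasing_by
    rw [PySem.Int.floordiv_eq_ediv_of_pos (by omega)]
    omega

theorem get_repr_alt_eq (n : Int) :
    get_repr_alt n =
      [n, horner 3 (bitsOf n).reverse, horner 4 (bitsOf n).reverse,
       horner 5 (bitsOf n).reverse, horner 6 (bitsOf n).reverse,
       horner 7 (bitsOf n).reverse, horner 8 (bitsOf n).reverse,
       horner 9 (bitsOf n).reverse, horner 10 (bitsOf n).reverse] := rfl

-- ===== VERDICT (by name: the statement is the Claim_ definition above) =====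
theorem get_repr_spec : Claim_equal_get_repr := by
  intro n _
  show get_repr n = get_repr_alt n
  rw [get_repr_alt_eq]
  show getReprLoop n 0 [n, 0, 0, 0, 0, 0, 0, 0, 0] = _
  rw [getReprLoop_eq]
  simp only [horner_reverse, pow_zero, one_mul, zero_add]
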